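-- pv_equiv track=rewrite | github.com/openem-team/openem | train/openem_train/inception/inception_dataset.py | guess_species
-- ===== SOURCE A (Python) =====
-- def guess_species(known_species, frame_id):
--     """Returns a guess at a species based frames of known species and the
--        frame with a detection having unknown species.
--
--     # Arguments
--         known_species: Dict mapping frame to species names.
--         frame_id: Frame number of unknown species.
--
--     # Returns
--         Name of species.
--     """
--     known_frames = sorted(known_species.keys())
--     if not known_frames:
--         return None
--
--     for i, frame in enumerate(known_frames):
--         if frame == frame_id:
--             return known_species[frame]
--         if frame > frame_id:
--             if i == 0:
--                 return known_species[frame]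
--             if known_species[frame] == known_species[known_frames[i - 1]]:
--                 return known_species[frame]
--             return None
--
--     return known_species[known_frames[-1]]
-- ===== SOURCE B (Python) =====
-- def guess_species(known_species, frame_id):
--     if frame_id in known_species:
--         return known_species[frame_id]
--     lo = None
--     up = None
--     for k, v in known_species.items():
--         if k < frame_id:
--             if lo is None or k > lo[0]:
--                 lo = (k, v)
--         elif k > frame_id:
--             if up is None or k < up[0]:
--                 up = (k, v)
--     if lo is None and up is None:
--         return None
--     if up is None:
--         return lo[1]
--     if lo is None:
--         return up[1]
--     return up[1] if up[1] == lo[1] else None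
-- ===== Notes on version B (the rewrite author's own statement) =====
-- stated objective: faster
-- what changed: Replaces sort-then-ordered-scan with a single unsorted pass that tracks the nearest lower and upper neighbor keys (after an O(n) exact-membership check), eliminating the sort.
import Mathlib
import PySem

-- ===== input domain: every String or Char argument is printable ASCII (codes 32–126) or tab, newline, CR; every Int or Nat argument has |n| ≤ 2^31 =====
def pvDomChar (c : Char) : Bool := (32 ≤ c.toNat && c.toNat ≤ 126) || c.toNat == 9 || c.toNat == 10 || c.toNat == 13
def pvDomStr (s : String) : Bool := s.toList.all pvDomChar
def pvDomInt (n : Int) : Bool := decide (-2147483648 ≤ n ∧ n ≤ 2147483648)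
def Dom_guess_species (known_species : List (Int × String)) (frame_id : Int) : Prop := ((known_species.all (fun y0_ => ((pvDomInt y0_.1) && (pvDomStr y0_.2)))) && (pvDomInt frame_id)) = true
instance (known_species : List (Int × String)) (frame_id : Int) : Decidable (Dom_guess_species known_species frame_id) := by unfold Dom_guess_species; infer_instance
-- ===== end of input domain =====

-- B replaces A's sort-then-ordered-scan by a single unsorted pass that tracks the nearest
-- lower and upper neighbor keys (after an exact-membership check): O(n) instead of O(n log n).


-- ===== PORT A =====
-- the 'for i, frame in enumerate(known_frames)' loop; 'prev' carries known_frames[i-1]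
-- (prev = none ↔ i == 0); the base case is the final 'return known_species[known_frames[-1]]'
-- (prev is then the last element; prev = none is unreachable there since the list is nonempty).
def guess_species_loop (d : PySem.Dict Int String) (frame_id : Int)
    (prev : Option Int) : List Int → Option String
  | [] => match prev with
          | some p => d.get? p
          | none => none
  | frame :: rest =>
    if frame = frame_id then d.get? frame
    else if frame > frame_id then
      match prev with
      | none => d.get? frame
      | some p => if d.get? frame = d.get? p then d.get? frame else none
    else guess_species_loop d frame_id (some frame) rest

def guess_species (known_species : List (Int × String)) (frame_id : Int) : Option String :=
  let d : PySem.Dict Int String := PySem.Dict.mk known_species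
  let known_frames := PySem.List.sorted d.keys (fun x => x) false
  if known_frames.isEmpty then none
  else guess_species_loop d frame_id none known_frames

-- ===== PORT B =====
def guess_species_step (frame_id : Int)
    (st : Option (Int × String) × Option (Int × String)) (p : Int × String) :
    Option (Int × String) × Option (Int × String) :=
  if p.1 < frame_id then
    (match st.1 with
     | none => (some p, st.2)
     | some l => if p.1 > l.1 then (some p, st.2) else st)
  else if p.1 > frame_id then
    (match st.2 with
     | none => (st.1, some p)
     | some u => if p.1 < u.1 then (st.1, some p) else st)
  else st

def guess_species_alt (known_species : List (Int × String)) (frame_id : Int) : Option String :=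
  let d : PySem.Dict Int String := PySem.Dict.mk known_species
  if d.contains frame_id then d.get? frame_id
  else
    match d.items.foldl (guess_species_step frame_id) (none, none) with
    | (none, none) => none
    | (some l, none) => some l.2
    | (none, some u) => some u.2
    | (some l, some u) => if u.2 = l.2 then some u.2 else none

-- ===== PRECONDITION & SPEC =====
def Spec_guess_species (known_species : List (Int × String)) (frame_id : Int) (out : Option String) : Prop := out = guess_species_alt known_species frame_id
instance (known_species : List (Int × String)) (frame_id : Int) (out : Option String) : Decidable (Spec_guess_species known_species frame_id out) := by unfold Spec_guess_species; infer_instance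

-- ===== CLAIM (what is proved, stated in full; the proofs are below) =====
def Claim_equal_guess_species : Prop := ∀ (known_species : List (Int × String)) (frame_id : Int), Dom_guess_species known_species frame_id → Spec_guess_species known_species frame_id (guess_species known_species frame_id)

-- ===== LEMMAS AND PROOFS =====

-- ===== LEMMAS AND PROOFS =====

-- the tail of A's scan, as a function of the effective previous element and the list of
-- keys strictly above frame_id (in scan order)
def afterScan (d : PySem.Dict Int String) (pr : Option Int) (ab : List Int) : Option String :=
  match ab with
  | [] => match pr with
          | some p => d.get? p
          | none => none
  | u :: _ => match pr with
              | none => d.get? u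
              | some p => if d.get? u = d.get? p then d.get? u else none

theorem getLast?_cons_eq_or (a : α) (l : List α) : (a :: l).getLast? = l.getLast?.or (some a) := by
  cases l <;> simp [List.getLast?_cons]

theorem pairwise_le_getLast (l : List Int) (h : l.Pairwise (· ≤ ·)) (m : Int)
    (hm : l.getLast? = some m) : ∀ y ∈ l, y ≤ m := by
  induction l with
  | nil => simp at hm
  | cons a t ih =>
    rcases List.pairwise_cons.mp h with ⟨ha, ht⟩
    intro y hy
    rw [getLast?_cons_eq_or] at hm
    cases htl : t.getLast? with
    | none =>
      rw [htl] at hm; simp [Option.or] at hm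
      rcases List.getLast?_eq_none_iff.mp htl with rfl
      simp at hy; omega
    | some b =>
      rw [htl] at hm; simp [Option.or] at hm; subst hm
      rcases List.mem_cons.mp hy with rfl | hy'
      · exact le_trans (ha b (List.mem_of_getLast? htl)) le_rfl
      · exact ih ht htl y hy'

theorem loopA_char (d : PySem.Dict Int String) (fid : Int) (prev : Option Int) (S : List Int)
    (hs : S.Pairwise (· ≤ ·)) :
    guess_species_loop d fid prev S =
      if fid ∈ S then d.get? fid
      else afterScan d (((S.filter (fun x => x < fid)).getLast?).or prev)
             (S.filter (fun x => fid < x)) := by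
  induction S generalizing prev with
  | nil => simp [guess_species_loop, afterScan]
  | cons f rest ih =>
    rcases List.pairwise_cons.mp hs with ⟨hf, hrest⟩
    by_cases h1 : f = fid
    · subst h1; simp [guess_species_loop]
    · by_cases h2 : f > fid
      · have hnotmem : fid ∉ f :: rest := by
          intro hm
          rcases List.mem_cons.mp hm with rfl | hm'
          · omega
          · have := hf _ hm'; omega
        have hbelow : (f :: rest).filter (fun x => x < fid) = [] := by
          rw [List.filter_eq_nil_iff]
          intro a ha
          rcases List.mem_cons.mp ha with rfl | ha'
          · simp; omega
          · have := hf _ ha'; simp; omega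
        have habove : (f :: rest).filter (fun x => fid < x) = f :: rest.filter (fun x => fid < x) := by
          simp [h2]
        rw [if_neg hnotmem, hbelow, habove]
        simp only [guess_species_loop, if_neg h1, if_pos h2]
        simp only [afterScan, List.getLast?_nil, Option.or]
      · have h3 : f < fid := by omega
        have hLHS : guess_species_loop d fid prev (f :: rest) =
            guess_species_loop d fid (some f) rest := by
          simp [guess_species_loop, h1, h2]
        rw [hLHS, ih (some f) hrest]
        have hmem : (fid ∈ f :: rest) ↔ (fid ∈ rest) := by
          simp [List.mem_cons]; intro h; omega
        have hbelow : (f :: rest).filter (fun x => x < fid) = f :: rest.filter (fun x => x < fid) := by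
          simp [h3]
        have habove : (f :: rest).filter (fun x => fid < x) = rest.filter (fun x => fid < x) := by
          simp [List.filter_cons]; omega
        rw [hbelow, habove, getLast?_cons_eq_or, Option.or_assoc]
        have hsf : (some f).or prev = some f := rfl
        rw [hsf]
        by_cases hm : fid ∈ rest
        · rw [if_pos hm, if_pos (hmem.mpr hm)]
        · rw [if_neg hm, if_neg (fun h => hm (hmem.mp h))]

-- split B's fold over the pair state into independent lower- and upper-neighbor folds
def stepLo (fid : Int) (lo : Option (Int × String)) (p : Int × String) : Option (Int × String) :=
  if p.1 < fid then
    match lo with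
    | none => some p
    | some l => if p.1 > l.1 then some p else lo
  else lo

def stepUp (fid : Int) (up : Option (Int × String)) (p : Int × String) : Option (Int × String) :=
  if fid < p.1 then
    match up with
    | none => some p
    | some u => if p.1 < u.1 then some p else up
  else up

theorem fold_pair (fid : Int) (l : List (Int × String)) (lo up : Option (Int × String)) :
    l.foldl (guess_species_step fid) (lo, up) = (l.foldl (stepLo fid) lo, l.foldl (stepUp fid) up) := by
  induction l generalizing lo up with
  | nil => rfl
  | cons p t ih =>
    have hstep : guess_species_step fid (lo, up) p = (stepLo fid lo p, stepUp fid up p) := by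
      simp only [guess_species_step, stepLo, stepUp]
      by_cases h1 : p.1 < fid
      · simp [h1]
        have : ¬ fid < p.1 := by omega
        simp [this]
        cases lo <;> simp
        split <;> simp
      · by_cases h2 : fid < p.1
        · have : ¬ p.1 < fid := h1
          simp [this, h2]
          cases up <;> simp
          split <;> simp
        · simp [h1, h2]
    rw [List.foldl_cons, hstep, ih, List.foldl_cons, List.foldl_cons]

theorem get?_mk_append_singleton (l : List (Int × String)) (x : Int × String) (k : Int) :
    (PySem.Dict.mk (l ++ [x])).get? k =
      ((PySem.Dict.mk l).get? k).or (if x.1 = k then some x.2 else none) := by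
  induction l with
  | nil =>
    simp only [List.nil_append]
    rw [PySem.Dict.get?_mk_cons]
    have hbase : (PySem.Dict.mk ([] : List (Int × String))).get? k = none := rfl
    rw [hbase]
    by_cases h : x.1 = k <;> simp [h, Option.or]
  | cons p t ih =>
    simp only [List.cons_append]
    rw [PySem.Dict.get?_mk_cons, PySem.Dict.get?_mk_cons]
    by_cases h : p.1 = k
    · simp [h, Option.or]
    · simp [h, ih]

-- invariant of the lower-neighbor fold: the tracked pair has the greatest key < frame_id,
-- and is the first pair of the list carrying that key (so dict lookup returns its value)
def loInv (fid : Int) (l : List (Int × String)) (r : Option (Int × String)) : Prop :=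
  match r with
  | none => ∀ p ∈ l, ¬ p.1 < fid
  | some m => m.1 < fid ∧ (∀ p ∈ l, p.1 < fid → p.1 ≤ m.1) ∧
      (PySem.Dict.mk l).get? m.1 = some m.2

def upInv (fid : Int) (l : List (Int × String)) (r : Option (Int × String)) : Prop :=
  match r with
  | none => ∀ p ∈ l, ¬ fid < p.1
  | some m => fid < m.1 ∧ (∀ p ∈ l, fid < p.1 → m.1 ≤ p.1) ∧
      (PySem.Dict.mk l).get? m.1 = some m.2

theorem get?_mk_eq_none_of_forall (l : List (Int × String)) (k : Int)
    (h : ∀ p ∈ l, p.1 ≠ k) : (PySem.Dict.mk l).get? k = none := by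
  induction l with
  | nil => rfl
  | cons p t ih =>
    rw [PySem.Dict.get?_mk_cons]
    have hp := h p (by simp)
    simp [hp]
    exact ih (fun q hq => h q (by simp [hq]))

theorem lo_spec (fid : Int) (l : List (Int × String)) : loInv fid l (l.foldl (stepLo fid) none) := by
  induction l using List.reverseRecOn with
  | nil => intro p hp; simp at hp
  | append_singleton t x ih =>
    rw [List.foldl_append]
    cases hr : t.foldl (stepLo fid) none with
    | none =>
      rw [hr] at ih
      by_cases hx : x.1 < fid
      · simp only [List.foldl_cons, List.foldl_nil, stepLo, if_pos hx]
        refine ⟨hx, ?_, ?_⟩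
        · intro p hp _
          rcases List.mem_append.mp hp with hp' | hp'
          · exact absurd ‹p.1 < fid› (ih p hp')
          · simp at hp'; subst hp'; exact le_rfl
        · rw [get?_mk_append_singleton]
          have : (PySem.Dict.mk t).get? x.1 = none :=
            get?_mk_eq_none_of_forall t x.1 (fun q hq h => (ih q hq) (h ▸ hx))
          simp [this, Option.or]
      · simp only [List.foldl_cons, List.foldl_nil, stepLo, if_neg hx]
        intro p hp
        rcases List.mem_append.mp hp with hp' | hp'
        · exact ih p hp'
        · simp at hp'; subst hp'; exact hx
    | some m =>
      rw [hr] at ih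
      obtain ⟨hm1, hm2, hm3⟩ := ih
      have hkeep : (PySem.Dict.mk (t ++ [x])).get? m.1 = some m.2 := by
        rw [get?_mk_append_singleton, hm3]; rfl
      by_cases hx : x.1 < fid
      · by_cases hgt : x.1 > m.1
        · simp only [List.foldl_cons, List.foldl_nil, stepLo, if_pos hx, hgt, if_pos]
          refine ⟨hx, ?_, ?_⟩
          · intro p hp hplt
            rcases List.mem_append.mp hp with hp' | hp'
            · exact le_trans (hm2 p hp' hplt) (le_of_lt hgt)
            · simp at hp'; subst hp'; exact le_rfl
          · rw [get?_mk_append_singleton]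
            have : (PySem.Dict.mk t).get? x.1 = none := by
              refine get?_mk_eq_none_of_forall t x.1 (fun q hq h => ?_)
              have := hm2 q hq (h ▸ hx); omega
            simp [this, Option.or]
        · simp only [List.foldl_cons, List.foldl_nil, stepLo, if_pos hx, hgt]
          refine ⟨hm1, ?_, hkeep⟩
          intro p hp hplt
          rcases List.mem_append.mp hp with hp' | hp'
          · exact hm2 p hp' hplt
          · simp at hp'; subst hp'; omega
      · simp only [List.foldl_cons, List.foldl_nil, stepLo, if_neg hx]
        refine ⟨hm1, ?_, hkeep⟩
        intro p hp hplt
        rcases List.mem_append.mp hp with hp' | hp'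
        · exact hm2 p hp' hplt
        · simp at hp'; subst hp'; exact absurd hplt hx

theorem up_spec (fid : Int) (l : List (Int × String)) : upInv fid l (l.foldl (stepUp fid) none) := by
  induction l using List.reverseRecOn with
  | nil => intro p hp; simp at hp
  | append_singleton t x ih =>
    rw [List.foldl_append]
    cases hr : t.foldl (stepUp fid) none with
    | none =>
      rw [hr] at ih
      by_cases hx : fid < x.1
      · simp only [List.foldl_cons, List.foldl_nil, stepUp, if_pos hx]
        refine ⟨hx, ?_, ?_⟩
        · intro p hp _
          rcases List.mem_append.mp hp with hp' | hp'
          · exact absurd ‹fid < p.1› (ih p hp')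
          · simp at hp'; subst hp'; exact le_rfl
        · rw [get?_mk_append_singleton]
          have : (PySem.Dict.mk t).get? x.1 = none :=
            get?_mk_eq_none_of_forall t x.1 (fun q hq h => (ih q hq) (h ▸ hx))
          simp [this, Option.or]
      · simp only [List.foldl_cons, List.foldl_nil, stepUp, if_neg hx]
        intro p hp
        rcases List.mem_append.mp hp with hp' | hp'
        · exact ih p hp'
        · simp at hp'; subst hp'; exact hx
    | some m =>
      rw [hr] at ih
      obtain ⟨hm1, hm2, hm3⟩ := ih
      have hkeep : (PySem.Dict.mk (t ++ [x])).get? m.1 = some m.2 := by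
        rw [get?_mk_append_singleton, hm3]; rfl
      by_cases hx : fid < x.1
      · by_cases hlt : x.1 < m.1
        · simp only [List.foldl_cons, List.foldl_nil, stepUp, if_pos hx, hlt, if_pos]
          refine ⟨hx, ?_, ?_⟩
          · intro p hp hplt
            rcases List.mem_append.mp hp with hp' | hp'
            · exact le_trans (le_of_lt hlt) (hm2 p hp' hplt)
            · simp at hp'; subst hp'; exact le_rfl
          · rw [get?_mk_append_singleton]
            have : (PySem.Dict.mk t).get? x.1 = none := by
              refine get?_mk_eq_none_of_forall t x.1 (fun q hq h => ?_)
              have := hm2 q hq (h ▸ hx); omega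
            simp [this, Option.or]
        · simp only [List.foldl_cons, List.foldl_nil, stepUp, if_pos hx, hlt]
          refine ⟨hm1, ?_, hkeep⟩
          intro p hp hplt
          rcases List.mem_append.mp hp with hp' | hp'
          · exact hm2 p hp' hplt
          · simp at hp'; subst hp'; omega
      · simp only [List.foldl_cons, List.foldl_nil, stepUp, if_neg hx]
        refine ⟨hm1, ?_, hkeep⟩
        intro p hp hplt
        rcases List.mem_append.mp hp with hp' | hp'
        · exact hm2 p hp' hplt
        · simp at hp'; subst hp'; exact absurd hplt hx

theorem mem_map_fst_of_get? (l : List (Int × String)) (k : Int) (v : String)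
    (h : (PySem.Dict.mk l).get? k = some v) : k ∈ l.map Prod.fst := by
  by_contra hk
  have hnone := get?_mk_eq_none_of_forall l k
    (fun p hp he => hk (he ▸ List.mem_map_of_mem (f := Prod.fst) hp))
  rw [hnone] at h; cases h

theorem guess_species_spec : Claim_equal_guess_species := by
  intro ks fid _
  show guess_species ks fid = guess_species_alt ks fid
  simp only [guess_species, guess_species_alt]
  set d : PySem.Dict Int String := PySem.Dict.mk ks with hd
  have hkeys : d.keys = ks.map Prod.fst := by simp [hd]
  set S := PySem.List.sorted d.keys (fun x => x) false with hS
  have hs : S.Pairwise (· ≤ ·) := PySem.List.sorted_pairwise d.keys (fun x => x)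
  have hperm : S.Perm (ks.map Prod.fst) := hkeys ▸ PySem.List.sorted_perm d.keys (fun x => x) false
  have hitems : d.items = ks := rfl
  by_cases hc : fid ∈ ks.map Prod.fst
  · -- exact key present: both return d.get? fid
    have hcS : fid ∈ S := hperm.mem_iff.mpr hc
    have hne : S.isEmpty = false := by
      rw [List.isEmpty_eq_false_iff]
      exact List.ne_nil_of_mem hcS
    have hcont : d.contains fid = true := by
      rw [PySem.Dict.contains_iff_mem_keys, hkeys]; exact hc
    rw [hne, hcont]
    simp only [Bool.false_eq_true, if_false, if_true]
    rw [loopA_char d fid none S hs, if_pos hcS]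
  · have hcont : d.contains fid = false := by
      rw [← Bool.not_eq_true, PySem.Dict.contains_iff_mem_keys, hkeys]; exact hc
    rw [hcont]
    simp only [Bool.false_eq_true, if_false]
    rw [fold_pair]
    have hlo := lo_spec fid ks
    have hup := up_spec fid ks
    cases hE : S.isEmpty with
    | true =>
      -- empty dict: both None
      have hknil : ks = [] := by
        have : S = [] := List.isEmpty_iff.mp hE
        rw [this] at hperm
        exact List.map_eq_nil_iff.mp (List.Perm.nil_eq hperm).symm
      subst hknil
      rfl
    | false =>
      have hcS : fid ∉ S := fun h => hc (hperm.mem_iff.mp h)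
      rw [loopA_char d fid none S hs, if_neg hcS, Option.or_none]
      set bl := S.filter (fun x => decide (x < fid)) with hbl
      set ab := S.filter (fun x => decide (fid < x)) with hab
      have hblpw : bl.Pairwise (· ≤ ·) := List.Pairwise.filter _ hs
      have habpw : ab.Pairwise (· ≤ ·) := List.Pairwise.filter _ hs
      -- characterize bl.getLast? from the lower-neighbor fold result
      have hloC : bl.getLast? = (ks.foldl (stepLo fid) none).map Prod.fst ∧
          (∀ m, ks.foldl (stepLo fid) none = some m → d.get? m.1 = some m.2) := by
        cases hr : ks.foldl (stepLo fid) none with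
        | none =>
          rw [hr] at hlo
          have : bl = [] := by
            rw [hbl, List.filter_eq_nil_iff]
            intro a haS
            rcases List.mem_map.mp (hperm.mem_iff.mp haS) with ⟨p, hp, rfl⟩
            simpa using hlo p hp
          simp [this]
        | some m =>
          rw [hr] at hlo
          obtain ⟨hm1, hm2, hm3⟩ := hlo
          have hmS : m.1 ∈ S := hperm.mem_iff.mpr (mem_map_fst_of_get? ks m.1 m.2 hm3)
          have hmbl : m.1 ∈ bl := by
            rw [hbl, List.mem_filter]; exact ⟨hmS, by simpa using hm1⟩
          have hblne : bl ≠ [] := fun h => by simp [h] at hmbl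
          obtain ⟨g, hg⟩ := Option.ne_none_iff_exists'.mp
            (fun h => hblne (List.getLast?_eq_none_iff.mp h))
          have hgbl : g ∈ bl := List.mem_of_getLast? hg
          have hgS : g ∈ S := List.mem_of_mem_filter hgbl
          have hglt : g < fid := by
            have := (List.mem_filter.mp hgbl).2; simpa using this
          rcases List.mem_map.mp (hperm.mem_iff.mp hgS) with ⟨p, hp, hpg⟩
          have h1 : g ≤ m.1 := hpg ▸ hm2 p hp (hpg ▸ hglt)
          have h2 : m.1 ≤ g := pairwise_le_getLast bl hblpw g hg m.1 hmbl
          have : g = m.1 := le_antisymm h1 h2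
          subst this
          exact ⟨by simp [hg], by intro m' hm'; injection hm' with h; subst h; exact hm3⟩
      -- characterize ab.head? from the upper-neighbor fold result
      have hupC : ab.head? = (ks.foldl (stepUp fid) none).map Prod.fst ∧
          (∀ m, ks.foldl (stepUp fid) none = some m → d.get? m.1 = some m.2) := by
        cases hr : ks.foldl (stepUp fid) none with
        | none =>
          rw [hr] at hup
          have : ab = [] := by
            rw [hab, List.filter_eq_nil_iff]
            intro a haS
            rcases List.mem_map.mp (hperm.mem_iff.mp haS) with ⟨p, hp, rfl⟩
            simpa using hup p hp
          simp [this]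
        | some m =>
          rw [hr] at hup
          obtain ⟨hm1, hm2, hm3⟩ := hup
          have hmS : m.1 ∈ S := hperm.mem_iff.mpr (mem_map_fst_of_get? ks m.1 m.2 hm3)
          have hmab : m.1 ∈ ab := by
            rw [hab, List.mem_filter]; exact ⟨hmS, by simpa using hm1⟩
          have habne : ab ≠ [] := fun h => by simp [h] at hmab
          obtain ⟨g, tl, hg⟩ := List.exists_cons_of_ne_nil habne
          have hgab : g ∈ ab := by rw [hg]; simp
          have hgS : g ∈ S := List.mem_of_mem_filter hgab
          have hggt : fid < g := by
            have := (List.mem_filter.mp hgab).2; simpa using this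
          rcases List.mem_map.mp (hperm.mem_iff.mp hgS) with ⟨p, hp, hpg⟩
          have h1 : m.1 ≤ g := hpg ▸ hm2 p hp (hpg ▸ hggt)
          have h2 : g ≤ m.1 := by
            rw [hg] at hmab
            rcases List.mem_cons.mp hmab with h | h
            · omega
            · exact (List.pairwise_cons.mp (hg ▸ habpw)).1 m.1 h
          have : g = m.1 := le_antisymm h2 h1
          subst this
          exact ⟨by simp [hg], by intro m' hm'; injection hm' with h; subst h; exact hm3⟩
      obtain ⟨hloL, hloV⟩ := hloC
      obtain ⟨hupL, hupV⟩ := hupC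
      cases hrl : ks.foldl (stepLo fid) none with
      | none =>
        cases hru : ks.foldl (stepUp fid) none with
        | none =>
          rw [hrl] at hloL; rw [hru] at hupL
          have habnil : ab = [] := List.head?_eq_none_iff.mp (by simpa using hupL)
          have hblnil : bl = [] := List.getLast?_eq_none_iff.mp (by simpa using hloL)
          rw [habnil, hblnil]
          rfl
        | some u =>
          rw [hrl] at hloL; rw [hru] at hupL
          have hblnil : bl = [] := List.getLast?_eq_none_iff.mp (by simpa using hloL)
          obtain ⟨g, tl, hg⟩ : ∃ g tl, ab = g :: tl := by
            cases hA : ab with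
            | nil => rw [hA] at hupL; simp at hupL
            | cons a t => exact ⟨a, t, rfl⟩
          have hgu : g = u.1 := by
            rw [hg] at hupL
            simpa using hupL
          rw [hblnil, hg, hgu]
          simp [afterScan, hupV u hru]
      | some l =>
        have hgl : bl.getLast? = some l.1 := by rw [hrl] at hloL; simpa using hloL
        cases hru : ks.foldl (stepUp fid) none with
        | none =>
          rw [hru] at hupL
          have habnil : ab = [] := List.head?_eq_none_iff.mp (by simpa using hupL)
          rw [habnil]
          simp [afterScan, hgl, hloV l hrl]
        | some u =>
          obtain ⟨g, tl, hg⟩ : ∃ g tl, ab = g :: tl := by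
            cases hA : ab with
            | nil => rw [hA, hru] at hupL; simp at hupL
            | cons a t => exact ⟨a, t, rfl⟩
          have hgu : g = u.1 := by
            rw [hg, hru] at hupL
            simpa using hupL
          rw [hg, hgu]
          simp [afterScan, hgl, hloV l hrl, hupV u hru]
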